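-- pv_equiv track=rewrite | github.com/tobywhughes/Data-Center-Neural-Forecast | pcap_parser.py | convert_to_seconds_series
-- ===== SOURCE A (Python) =====
-- def convert_to_seconds_series(packet_list):
--     current_packet_count = 0
--     last_packet_time = 0
--     packet_times = []
--     start_time = packet_list[0]
--     update_flag = False
--     for packet in packet_list:
--         current_packet_time = packet - start_time
--         if current_packet_time == last_packet_time:
--             current_packet_count += 1
--             update_flag = False
--         else:
--             packet_times.append((packet - 1, current_packet_count))
--             current_packet_count = 1
--             update_flag == True
--         last_packet_time = current_packet_time
--     if update_flag == False:
--         packet_times.append((packet_list[-1], current_packet_count))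
--     return packet_times
-- ===== SOURCE B (Python) =====
-- def convert_to_seconds_series(packet_list):
--     n = len(packet_list)
--     edges = [i for i in range(1, n) if packet_list[i] != packet_list[i - 1]] + [n]
--     starts = [0] + edges[:-1]
--     result = [(packet_list[e] - 1, e - s) for e, s in zip(edges[:-1], starts)]
--     result.append((packet_list[-1], n - starts[-1]))
--     return result
-- ===== Notes on version B (the rewrite author's own statement) =====
-- stated objective: alternative
-- what changed: Replaced A's single stateful loop (running time-diff vs last_packet_time, running count, dead update_flag, post-loop append) by a two-pass construction: first collect the run-boundary indices, then emit each (boundary packet - 1, run length) pair from consecutive boundaries plus the final (last packet, last run length) pair.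
import Mathlib
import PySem

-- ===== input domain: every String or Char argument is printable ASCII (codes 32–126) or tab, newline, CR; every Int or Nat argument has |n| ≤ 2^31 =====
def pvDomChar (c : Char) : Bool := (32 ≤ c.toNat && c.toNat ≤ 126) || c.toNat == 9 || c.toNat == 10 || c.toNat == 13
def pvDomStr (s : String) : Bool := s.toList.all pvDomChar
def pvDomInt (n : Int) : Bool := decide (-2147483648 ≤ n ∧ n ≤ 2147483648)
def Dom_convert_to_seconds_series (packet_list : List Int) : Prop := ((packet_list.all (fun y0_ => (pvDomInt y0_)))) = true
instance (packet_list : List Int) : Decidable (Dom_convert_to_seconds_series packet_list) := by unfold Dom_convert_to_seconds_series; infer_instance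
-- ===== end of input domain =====

-- B replaces A's single stateful loop (running time-diff, count, dead flag, post-loop append)
-- by a two-pass construction: collect the run-boundary indices, then emit the pairs from
-- consecutive boundaries (objective: alternative; same return value on every nonempty list).

-- ===== PORT A =====
-- literal transliteration of Source A: fold carrying (count, last_packet_time, packet_times, update_flag);
-- `update_flag == True` in Python's else branch is a no-op comparison, so the flag is left unchanged there.
def convert_to_seconds_series (packet_list : List Int) : List (Int × Int) :=
  match packet_list with
  | [] => []  -- Python raises IndexError at packet_list[0]; excluded by Pre_
  | p :: rest =>
    let start_time := p
    let st := (p :: rest).foldl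
      (fun (st : Int × Int × List (Int × Int) × Bool) packet =>
        let current_packet_time := packet - start_time
        if current_packet_time = st.2.1 then
          (st.1 + 1, current_packet_time, st.2.2.1, false)
        else
          (1, current_packet_time, st.2.2.1 ++ [(packet - 1, st.1)], st.2.2.2))
      (0, 0, [], false)
    if st.2.2.2 = false then st.2.2.1 ++ [((p :: rest).getLastD 0, st.1)] else st.2.2.1

-- ===== PORT B =====
-- literal transliteration of Source B: boundary indices `edges` (ending with n), run starts, zip/map, final pair.
def convert_to_seconds_series_alt (packet_list : List Int) : List (Int × Int) :=
  match packet_list with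
  | [] => []  -- Python raises IndexError at packet_list[-1]; excluded by Pre_
  | p :: rest =>
    let pl := p :: rest
    let n := pl.length
    let edges := ((List.range' 1 (n - 1)).filter (fun i => pl.getD i 0 ≠ pl.getD (i - 1) 0)) ++ [n]
    let starts := 0 :: edges.dropLast
    let result := (edges.dropLast.zip starts).map
      (fun es => (pl.getD es.1 0 - 1, (es.1 : Int) - (es.2 : Int)))
    result ++ [(pl.getLastD 0, (n : Int) - (starts.getLastD 0 : Int))]

-- ===== PRECONDITION & SPEC =====
-- Pre_ excludes only the empty list, on which Python A raises IndexError (B raises too).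
def Pre_convert_to_seconds_series (packet_list : List Int) : Prop := packet_list ≠ []
instance (packet_list : List Int) : Decidable (Pre_convert_to_seconds_series packet_list) := by unfold Pre_convert_to_seconds_series; infer_instance
def pvWitness_convert_to_seconds_series : List Int := ([0, 0, 2])
def Spec_convert_to_seconds_series (packet_list : List Int) (out : List (Int × Int)) : Prop := out = convert_to_seconds_series_alt packet_list
instance (packet_list : List Int) (out : List (Int × Int)) : Decidable (Spec_convert_to_seconds_series packet_list out) := by unfold Spec_convert_to_seconds_series; infer_instance

-- ===== CLAIM (what is proved, stated in full; the proofs are below) =====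
def Claim_equal_convert_to_seconds_series : Prop := ∀ (packet_list : List Int), Dom_convert_to_seconds_series packet_list → Pre_convert_to_seconds_series packet_list → Spec_convert_to_seconds_series packet_list (convert_to_seconds_series packet_list)

-- ===== LEMMAS AND PROOFS =====

-- Common run-length specification both ports are reduced to.
def emitB (lastEl : Int) (h c : Int) : List Int → List (Int × Int)
  | [] => [(lastEl, c)]
  | x :: r => if x = h then emitB lastEl h (c + 1) r else (x - 1, c) :: emitB lastEl x 1 r

-- A-side step and finalize, named for the proofs.
def stepA (start : Int) (st : Int × Int × List (Int × Int) × Bool) (packet : Int) :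
    Int × Int × List (Int × Int) × Bool :=
  let t := packet - start
  if t = st.2.1 then (st.1 + 1, t, st.2.2.1, false)
  else (1, t, st.2.2.1 ++ [(packet - 1, st.1)], st.2.2.2)

def finA (lastEl : Int) (st : Int × Int × List (Int × Int) × Bool) : List (Int × Int) :=
  if st.2.2.2 = false then st.2.2.1 ++ [(lastEl, st.1)] else st.2.2.1

theorem A_main (l : List Int) : ∀ (q c : Int) (ts : List (Int × Int)) (start lastEl : Int),
    finA lastEl (List.foldl (stepA start) (c, q - start, ts, false) l) = ts ++ emitB lastEl q c l := by
  induction l with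
  | nil => intro q c ts start lastEl; simp [finA, emitB]
  | cons x r ih =>
    intro q c ts start lastEl
    simp only [List.foldl_cons, emitB]
    by_cases hx : x = q
    · subst hx
      have hs : stepA start (c, x - start, ts, false) x = (c + 1, x - start, ts, false) := by
        simp [stepA]
      rw [hs, if_pos rfl]
      exact ih x (c + 1) ts start lastEl
    · have h1 : ¬ (x - start = q - start) := by intro h; apply hx; omega
      have hs : stepA start (c, q - start, ts, false) x
          = (1, x - start, ts ++ [(x - 1, c)], false) := by
        simp [stepA, h1]
      rw [hs, if_neg hx]
      have := ih x 1 (ts ++ [(x - 1, c)]) start lastEl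
      simpa using this

-- B-side: emitE consumes consecutive boundary pairs.
def emitE (pl : List Int) (lastEl : Int) : Nat → List Nat → List (Int × Int)
  | _, [] => []
  | s, [e] => [(lastEl, (e : Int) - (s : Int))]
  | s, e :: e' :: es => (pl.getD e 0 - 1, (e : Int) - (s : Int)) :: emitE pl lastEl e (e' :: es)

theorem emitE_cons_ne (pl : List Int) (lastEl : Int) (s e : Nat) (es : List Nat) (h : es ≠ []) :
    emitE pl lastEl s (e :: es)
    = (pl.getD e 0 - 1, (e : Int) - (s : Int)) :: emitE pl lastEl e es := by
  cases es with
  | nil => exact absurd rfl h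
  | cons a l => rfl

def bnds (pl : List Int) : List Nat :=
  (List.range' 1 (pl.length - 1)).filter (fun i => pl.getD i 0 ≠ pl.getD (i - 1) 0)

def edgesOf (pl : List Int) : List Nat := bnds pl ++ [pl.length]

-- zip/map/append formulation of Source B equals emitE.
theorem Z_main (pl : List Int) (lastEl : Int) : ∀ (es : List Nat) (s : Nat), es ≠ [] →
    (es.dropLast.zip (s :: es.dropLast)).map
        (fun q => (pl.getD q.1 0 - 1, (q.1 : Int) - (q.2 : Int)))
      ++ [(lastEl, (es.getLastD 0 : Int) - ((s :: es.dropLast).getLastD 0 : Int))]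
    = emitE pl lastEl s es := by
  intro es
  induction es with
  | nil => intro s h; exact absurd rfl h
  | cons e es' ih =>
    intro s _
    cases es' with
    | nil => simp [emitE]
    | cons e' es'' =>
      have h := ih e (by simp)
      rw [emitE_cons_ne pl lastEl s e (e' :: es'') (by simp), ← h]
      simp

-- shift lemma for the boundary list
theorem bnds_shift (p q : Int) (r : List Int) :
    bnds (p :: q :: r) = (if q ≠ p then [1] else []) ++ (bnds (q :: r)).map (· + 1) := by
  unfold bnds
  have hlen : (p :: q :: r).length - 1 = r.length + 1 := by simp
  have hlen2 : (q :: r).length - 1 = r.length := by simp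
  rw [hlen, hlen2, List.range'_succ]
  have hshift : List.range' (1 + 1) r.length = (List.range' 1 r.length).map (fun x => 1 + x) := by
    rw [List.map_add_range']
  rw [hshift, List.filter_cons, List.filter_map]
  have hcong : List.filter ((fun i => decide ((p :: q :: r).getD i 0 ≠ (p :: q :: r).getD (i - 1) 0)) ∘ (fun x => 1 + x)) (List.range' 1 r.length)
      = List.filter (fun i => decide ((q :: r).getD i 0 ≠ (q :: r).getD (i - 1) 0)) (List.range' 1 r.length) := by
    apply List.filter_congr
    intro i hi
    have h1i : 1 ≤ i := (List.mem_range'_1.mp hi).1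
    obtain ⟨j, rfl⟩ : ∃ j, i = j + 1 := ⟨i - 1, by omega⟩
    have e1 : 1 + (j + 1) = j + 2 := by omega
    have e2 : j + 2 - 1 = j + 1 := by omega
    have e3 : j + 1 - 1 = j := by omega
    simp only [Function.comp, e1, e2, e3, List.getD_cons_succ]
  rw [hcong]
  by_cases hq : q = p
  · subst hq
    simp [Nat.add_comm]
  · simp only [ne_eq, hq, not_false_eq_true, if_pos, List.getD_cons_succ, List.getD_cons_zero,
      decide_not]
    have : (decide (q = p) : Bool) = false := by simp [hq]
    simp [hq, Nat.add_comm]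

-- main B lemma: emitE over shifted tail edges equals emitB.
theorem getD_append_length (u l : List Int) (k : Nat) :
    (u ++ l).getD (u.length + k) 0 = l.getD k 0 := by
  rw [List.getD_append_right u l 0 (u.length + k) (by omega)]
  congr 1
  omega

theorem M_main (r : List Int) : ∀ (q : Int) (u : List Int) (s : Nat) (lastEl : Int), s ≤ u.length →
    emitE (u ++ q :: r) lastEl s ((edgesOf (q :: r)).map (· + u.length))
    = emitB lastEl q ((u.length : Int) + 1 - (s : Int)) r := by
  induction r with
  | nil =>
    intro q u s lastEl hs
    simp [edgesOf, bnds, emitE, emitB]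
    ring
  | cons w r' ih =>
    intro q u s lastEl hs
    have hedge : edgesOf (q :: w :: r') = (if w ≠ q then [1] else []) ++ (edgesOf (w :: r')).map (· + 1) := by
      unfold edgesOf
      rw [bnds_shift]
      by_cases hw : w = q <;> simp [hw]
    rw [hedge]
    by_cases hw : w = q
    · subst hw
      rw [if_neg (by simp)]
      rw [List.nil_append, List.map_map]
      have hmap : (edgesOf (w :: r')).map ((· + u.length) ∘ (· + 1))
          = (edgesOf (w :: r')).map (· + (u ++ [w]).length) := by
        apply List.map_congr_left
        intro a _
        simp
        omega
      have hu : u ++ w :: w :: r' = (u ++ [w]) ++ w :: r' := by simp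
      rw [hmap, hu, ih w (u ++ [w]) s lastEl (by simp; omega)]
      simp only [emitB, if_true]
      congr 1
      simp
      ring
    · rw [if_pos hw, List.singleton_append, List.map_cons]
      rw [emitE_cons_ne _ _ _ _ _ (by simp [edgesOf])]
      have hget : (u ++ q :: w :: r').getD (1 + u.length) 0 = w := by
        rw [Nat.add_comm]
        have : u.length + 1 = u.length + 1 := rfl
        rw [getD_append_length u (q :: w :: r') 1]
        rfl
      rw [hget]
      rw [List.map_map]
      have hmap : (edgesOf (w :: r')).map ((· + u.length) ∘ (· + 1))
          = (edgesOf (w :: r')).map (· + (u ++ [q]).length) := by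
        apply List.map_congr_left
        intro a _
        simp
        omega
      have hu : u ++ q :: w :: r' = (u ++ [q]) ++ w :: r' := by simp
      rw [hmap, hu]
      have h1 : (1 + u.length : Nat) = (u ++ [q]).length := by simp; omega
      rw [h1, ih w (u ++ [q]) ((u ++ [q]).length) lastEl (le_refl _)]
      simp only [emitB, if_neg hw]
      congr 1
      · congr 1
        simp only [List.length_append, List.length_cons, List.length_nil]
        push_cast
        ring
      · congr 1
        simp only [List.length_append, List.length_cons, List.length_nil]
        push_cast
        ring

theorem edgesOf_getLastD (pl : List Int) : (edgesOf pl).getLastD 0 = pl.length := by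
  unfold edgesOf
  exact List.getLastD_concat

theorem B_emitE (p : Int) (rest : List Int) :
    convert_to_seconds_series_alt (p :: rest)
    = emitE (p :: rest) ((p :: rest).getLastD 0) 0 (edgesOf (p :: rest)) := by
  have h0 : convert_to_seconds_series_alt (p :: rest)
      = ((edgesOf (p :: rest)).dropLast.zip (0 :: (edgesOf (p :: rest)).dropLast)).map
          (fun q => ((p :: rest).getD q.1 0 - 1, (q.1 : Int) - (q.2 : Int)))
        ++ [((p :: rest).getLastD 0,
             (((p :: rest).length : Nat) : Int) - (((0 :: (edgesOf (p :: rest)).dropLast).getLastD 0 : Nat) : Int))] := rfl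
  rw [h0, ← edgesOf_getLastD (p :: rest)]
  exact Z_main (p :: rest) ((p :: rest).getLastD 0) (edgesOf (p :: rest)) 0 (by simp [edgesOf])

theorem A_emitB (p : Int) (rest : List Int) :
    convert_to_seconds_series (p :: rest)
    = emitB ((p :: rest).getLastD 0) p 1 rest := by
  have h0 : convert_to_seconds_series (p :: rest)
      = finA ((p :: rest).getLastD 0) (List.foldl (stepA p) (0, 0, [], false) (p :: rest)) := rfl
  rw [h0, List.foldl_cons]
  have h1 : stepA p (0, 0, ([] : List (Int × Int)), false) p = (1, p - p, [], false) := by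
    simp [stepA]
  rw [h1]
  have := A_main rest p 1 [] p ((p :: rest).getLastD 0)
  simpa using this

-- ===== VERDICT (by name: the statement is the Claim_ definition above) =====
theorem convert_to_seconds_series_spec : Claim_equal_convert_to_seconds_series := by
  intro packet_list _ hpre
  unfold Spec_convert_to_seconds_series
  match packet_list with
  | [] => exact absurd rfl hpre
  | p :: rest =>
    rw [A_emitB, B_emitE]
    have := M_main rest p [] 0 ((p :: rest).getLastD 0) (by simp)
    simp only [List.nil_append, List.length_nil, Nat.cast_zero, zero_add, sub_zero] at this
    rw [← this]
    congr 1
    simp
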